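-- pv_equiv track=rewrite | github.com/zhy2249/sparse-transform-codeing | CABAC_Estimator.py | scan_order
-- ===== SOURCE A (Python) =====
-- from typing import List, Sequence
--
-- def diag_scan_order(width: int, height: int) -> List[int]:
--     """Generate diagonal scan order."""
--     order = []
--     x = y = 0
--     for _ in range(width * height):
--         order.append(y * width + x)
--         if x == width - 1 or y == 0:
--             y += x + 1
--             x = 0
--             if y >= height:
--                 x += y - (height - 1)
--                 y = height - 1
--         else:
--             x += 1
--             y -= 1
--     return order
--
-- def scan_order(size: int) -> List[int]:
--     """Return scanning order for ``size`` square block."""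
--     if size == 4:
--         return diag_scan_order(4, 4)
--     # size == 8
--     group_order = diag_scan_order(2, 2)
--     inside = diag_scan_order(4, 4)
--     order: List[int] = []
--     for g in group_order:
--         gx, gy = g % 2, g // 2
--         base = gy * 4 * size + gx * 4
--         for p in inside:
--             px, py = p % 4, p // 4
--             order.append(base + py * size + px)
--     return order
-- ===== SOURCE B (Python) =====
-- from typing import List
--
-- def diag_scan_order(width: int, height: int) -> List[int]:
--     """Diagonal scan by enumerating anti-diagonals directly."""
--     order: List[int] = []
--     for d in range(width + height - 1):
--         for x in range(max(0, d - height + 1), min(width - 1, d) + 1):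
--             order.append((d - x) * width + x)
--     return order
--
-- def scan_order(size: int) -> List[int]:
--     if size == 4:
--         return diag_scan_order(4, 4)
--     return [
--         (g // 2) * 4 * size + (g % 2) * 4 + (p // 4) * size + p % 4
--         for g in diag_scan_order(2, 2)
--         for p in diag_scan_order(4, 4)
--     ]
-- ===== Notes on version B (the rewrite author's own statement) =====
-- stated objective: simpler
-- what changed: diag_scan_order loops over anti-diagonals with explicit per-diagonal x-bounds instead of stepping cell-by-cell with boundary-wrap state, and the size-8 composition becomes a single comprehension over the two scan lists instead of nested accumulator loops.
import Mathlib
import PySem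

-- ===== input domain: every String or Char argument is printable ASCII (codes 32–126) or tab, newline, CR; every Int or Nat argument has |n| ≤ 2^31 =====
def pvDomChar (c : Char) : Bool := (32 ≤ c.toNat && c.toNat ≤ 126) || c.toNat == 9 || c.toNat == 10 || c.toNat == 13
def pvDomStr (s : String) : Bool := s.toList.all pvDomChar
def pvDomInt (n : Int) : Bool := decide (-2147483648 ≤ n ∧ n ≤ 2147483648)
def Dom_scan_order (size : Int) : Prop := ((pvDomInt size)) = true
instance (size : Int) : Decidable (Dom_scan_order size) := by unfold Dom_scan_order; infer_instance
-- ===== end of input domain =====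

-- B replaces the cell-by-cell diagonal walk with a direct loop over anti-diagonals
-- and builds the size-8 composition as a single comprehension (objective: simpler).

-- ===== PORT A =====
-- A's diag_scan_order: step cell by cell, keeping (order, x, y) as loop state.
def diagScanA (width height : Int) : List Int :=
  (PySem.List.pyRange 0 (width * height) 1).foldl
    (fun (st : List Int × Int × Int) _ =>
      let (order, x, y) := st
      let order := order ++ [y * width + x]
      if x = width - 1 ∨ y = 0 then
        let y := y + x + 1
        let x := (0 : Int)
        if y ≥ height then (order, x + y - (height - 1), height - 1)
        else (order, x, y)
      else (order, x + 1, y - 1))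
    ([], 0, 0) |>.1

def scan_order (size : Int) : List Int :=
  if size = 4 then diagScanA 4 4
  else
    let group_order := diagScanA 2 2
    let inside := diagScanA 4 4
    group_order.foldl
      (fun (order : List Int) g =>
        let gx := PySem.Int.mod g 2
        let gy := PySem.Int.floordiv g 2
        let base := gy * 4 * size + gx * 4
        inside.foldl
          (fun order p =>
            let px := PySem.Int.mod p 4
            let py := PySem.Int.floordiv p 4
            order ++ [base + py * size + px])
          order)
      []

-- ===== PORT B =====
-- B's diag_scan_order: enumerate anti-diagonal d, then x along it.
def diagScanB (width height : Int) : List Int :=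
  (PySem.List.pyRange 0 (width + height - 1) 1).flatMap fun d =>
    (PySem.List.pyRange (max 0 (d - height + 1)) (min (width - 1) d + 1) 1).map fun x =>
      (d - x) * width + x

def scan_order_alt (size : Int) : List Int :=
  if size = 4 then diagScanB 4 4
  else
    (diagScanB 2 2).flatMap fun g =>
      (diagScanB 4 4).map fun p =>
        PySem.Int.floordiv g 2 * 4 * size + PySem.Int.mod g 2 * 4
          + PySem.Int.floordiv p 4 * size + PySem.Int.mod p 4

-- ===== PRECONDITION & SPEC =====
def Spec_scan_order (size : Int) (out : List Int) : Prop := out = scan_order_alt size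
instance (size : Int) (out : List Int) : Decidable (Spec_scan_order size out) := by unfold Spec_scan_order; infer_instance

-- ===== CLAIM (what is proved, stated in full; the proofs are below) =====
def Claim_equal_scan_order : Prop := ∀ (size : Int), Dom_scan_order size → Spec_scan_order size (scan_order size)

-- ===== LEMMAS AND PROOFS =====
theorem diag44_eq : diagScanA 4 4 = diagScanB 4 4 := by decide
theorem diag22_eq : diagScanA 2 2 = diagScanB 2 2 := by decide

-- ===== VERDICT (by name: the statement is the Claim_ definition above) =====
theorem scan_order_spec : Claim_equal_scan_order := by
  intro size _
  show scan_order size = scan_order_alt size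
  by_cases h : size = 4
  · simp [scan_order, scan_order_alt, h, diag44_eq]
  · simp only [scan_order, scan_order_alt, if_neg h, diag44_eq, diag22_eq,
      PySem.List.foldl_append_singleton_eq_map, PySem.List.foldl_append_eq_flatMap,
      List.nil_append]
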